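-- pv_equiv track=rewrite | github.com/angelomenezes/Algorithm_Design | Greedy Algorithm Problems/match_making.py | match_making
-- ===== SOURCE A (Python) =====
-- from bisect import bisect_left
--
-- def get_closest(myList, item): # Binary search in a sorted list
--
--     pos = bisect_left(myList, item)
--
--     if pos == 0:
--         return myList[0]
--     if pos == len(myList):
--         return myList[-1]
--
--     before = myList[pos - 1]
--     after = myList[pos]
--
--     if after - item < item - before:
--        return after
--     else:
--        return before
--
-- def match_making(n_bachelor, n_spinster, bachelor_ages, spinster_ages):
--
--     # Sorting arrays only once
--
--     bachelor_ages.sort()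
--     spinster_ages.sort()
--
--     while len(bachelor_ages) != 0 and len(spinster_ages) != 0:
--
--         match = bachelor_ages.pop()
--         spinster_ages.remove(get_closest(spinster_ages, match))
--
--     if len(bachelor_ages) == 0:
--         return 0, 0
--
--     return len(bachelor_ages), bachelor_ages.pop(0)
-- ===== SOURCE B (Python) =====
-- def match_making(n_bachelor, n_spinster, bachelor_ages, spinster_ages):
--     # The greedy loop pairs off min(len(b), len(s)) oldest bachelors, so the
--     # result depends only on the size surplus and the youngest bachelor.
--     extra = len(bachelor_ages) - len(spinster_ages)
--     if extra <= 0: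
--         return 0, 0
--     return extra, min(bachelor_ages)
-- ===== Notes on version B (the rewrite author's own statement) =====
-- stated objective: faster
-- what changed: Replaces the sort + repeated pop/binary-search/remove loop with a closed form: the loop always consumes min(n,m) bachelors from the top, so B returns (max(0,len(b)-len(s)), min(b)) directly.
import Mathlib
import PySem

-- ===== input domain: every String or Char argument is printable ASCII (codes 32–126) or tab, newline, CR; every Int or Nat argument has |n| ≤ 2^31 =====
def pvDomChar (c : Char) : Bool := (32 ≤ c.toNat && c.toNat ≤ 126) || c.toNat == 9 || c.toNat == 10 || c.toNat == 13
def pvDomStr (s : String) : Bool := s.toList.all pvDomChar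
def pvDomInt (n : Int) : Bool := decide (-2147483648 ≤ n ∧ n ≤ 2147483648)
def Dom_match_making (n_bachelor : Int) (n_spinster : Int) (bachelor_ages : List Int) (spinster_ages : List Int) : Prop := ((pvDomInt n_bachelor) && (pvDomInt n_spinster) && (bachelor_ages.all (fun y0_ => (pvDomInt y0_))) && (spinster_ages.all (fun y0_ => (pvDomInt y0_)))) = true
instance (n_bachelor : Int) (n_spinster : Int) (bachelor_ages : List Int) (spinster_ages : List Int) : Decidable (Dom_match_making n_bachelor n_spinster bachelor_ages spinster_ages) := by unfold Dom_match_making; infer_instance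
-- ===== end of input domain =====

-- B replaces A's sort + pop/binary-search/remove greedy loop by the closed form
-- (max(0, len(b)-len(s)), min(b)); equivalence is about the RETURN value only
-- (A sorts and empties its list arguments in place, B does not mutate them).

-- ===== PORT A =====
-- stdlib bisect.bisect_left ported as PySem.List.bisectLeft
-- (pos/before/after inlined; .getD 0 unreachable: every caller passes a nonempty list)
def get_closest (myList : List Int) (item : Int) : Int :=
  if PySem.List.bisectLeft myList item = 0 then (PySem.List.pyGet? myList 0).getD 0
  else if PySem.List.bisectLeft myList item = myList.length then (PySem.List.pyGet? myList (-1)).getD 0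
  else
    if (PySem.List.pyGet? myList (PySem.List.bisectLeft myList item : Int)).getD 0 - item
        < item - (PySem.List.pyGet? myList ((PySem.List.bisectLeft myList item : Int) - 1)).getD 0
    then (PySem.List.pyGet? myList (PySem.List.bisectLeft myList item : Int)).getD 0
    else (PySem.List.pyGet? myList ((PySem.List.bisectLeft myList item : Int) - 1)).getD 0

-- the while-loop of A: pop last bachelor, remove the closest spinster
def mmLoop (bs ss : List Int) : List Int × List Int :=
  if bs ≠ [] ∧ ss ≠ [] then
    match hp : PySem.List.pop? bs (-1) with
    | some r => mmLoop r.2 ((PySem.List.remove? ss (get_closest ss r.1)).getD ss)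
        -- remove?'s .getD ss unreachable: get_closest returns a member of ss
    | none => (bs, ss)  -- unreachable: bs ≠ []
  else (bs, ss)
termination_by bs.length
decreasing_by
  have := PySem.List.length_of_pop?_eq_some bs hp; omega

def match_making (n_bachelor : Int) (n_spinster : Int) (bachelor_ages : List Int) (spinster_ages : List Int) : Int × Int :=
  let b := PySem.List.sorted bachelor_ages (fun x => x) false
  let s := PySem.List.sorted spinster_ages (fun x => x) false
  let r := mmLoop b s
  if r.1 = [] then (0, 0)
  else
    match PySem.List.pop? r.1 0 with
    | some p => ((r.1.length : Int), p.1)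
    | none => (0, 0)  -- unreachable: r.1 ≠ []

-- ===== PORT B =====
def match_making_alt (n_bachelor : Int) (n_spinster : Int) (bachelor_ages : List Int) (spinster_ages : List Int) : Int × Int :=
  let extra : Int := (bachelor_ages.length : Int) - (spinster_ages.length : Int)
  if extra ≤ 0 then (0, 0)
  else (extra, (PySem.List.min? bachelor_ages (fun x => x)).getD 0)  -- .getD unreachable: extra > 0 → list nonempty

-- ===== PRECONDITION & SPEC =====
def Spec_match_making (n_bachelor : Int) (n_spinster : Int) (bachelor_ages : List Int) (spinster_ages : List Int) (out : Int × Int) : Prop := out = match_making_alt n_bachelor n_spinster bachelor_ages spinster_ages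
instance (n_bachelor : Int) (n_spinster : Int) (bachelor_ages : List Int) (spinster_ages : List Int) (out : Int × Int) : Decidable (Spec_match_making n_bachelor n_spinster bachelor_ages spinster_ages out) := by unfold Spec_match_making; infer_instance

-- ===== CLAIM (what is proved, stated in full; the proofs are below) =====
def Claim_equal_match_making : Prop := ∀ (n_bachelor : Int) (n_spinster : Int) (bachelor_ages : List Int) (spinster_ages : List Int), Dom_match_making n_bachelor n_spinster bachelor_ages spinster_ages → Spec_match_making n_bachelor n_spinster bachelor_ages spinster_ages (match_making n_bachelor n_spinster bachelor_ages spinster_ages)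

-- ===== LEMMAS AND PROOFS =====

-- get_closest on a nonempty sorted list returns a member
theorem get_closest_mem (ss : List Int) (m : Int) (hne : ss ≠ [])
    (hs : ss.Pairwise (· ≤ ·)) : get_closest ss m ∈ ss := by
  have hlen : 0 < ss.length := List.length_pos_iff.mpr hne
  have hspec := PySem.List.bisectLeft_spec ss m hs
  unfold get_closest
  split
  · -- pos = 0
    rw [PySem.List.pyGet?_zero]
    rw [List.getElem?_eq_getElem hlen]
    exact List.getElem_mem _
  · split
    · rw [PySem.List.pyGet?_neg_one]
      rw [List.getLast?_eq_getElem?]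
      rw [List.getElem?_eq_getElem (by omega)]
      exact List.getElem_mem _
    · -- 0 < pos < len
      rename_i h0 hl
      have hpos : 0 < PySem.List.bisectLeft ss m := Nat.pos_of_ne_zero h0
      have hlt : PySem.List.bisectLeft ss m < ss.length :=
        lt_of_le_of_ne hspec.1 hl
      have h1 : PySem.List.pyGet? ss ((PySem.List.bisectLeft ss m : Int) - 1)
          = some ss[PySem.List.bisectLeft ss m - 1] := by
        have : ((PySem.List.bisectLeft ss m : Int) - 1)
            = ((PySem.List.bisectLeft ss m - 1 : Nat) : Int) := by omega
        rw [this, PySem.List.pyGet?_natCast, List.getElem?_eq_getElem (by omega)]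
      have h2 : PySem.List.pyGet? ss (PySem.List.bisectLeft ss m : Int)
          = some ss[PySem.List.bisectLeft ss m] := by
        rw [PySem.List.pyGet?_natCast, List.getElem?_eq_getElem hlt]
      rw [h1, h2]
      simp only [Option.getD_some]
      split
      · exact List.getElem_mem _
      · exact List.getElem_mem _

-- the loop leaves exactly the first (len bs - len ss) bachelors
theorem mmLoop_fst (n : Nat) (bs ss : List Int) (hn : bs.length ≤ n)
    (hs : ss.Pairwise (· ≤ ·)) :
    (mmLoop bs ss).1 = bs.take (bs.length - ss.length) := by
  induction n generalizing bs ss with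
  | zero =>
    have : bs = [] := List.length_eq_zero_iff.mp (Nat.le_zero.mp hn)
    subst this
    rw [mmLoop]; simp
  | succ k ih =>
    rw [mmLoop]
    by_cases hb : bs = []
    · subst hb; simp
    by_cases hss : ss = []
    · subst hss; simp [hb]
    rw [if_pos ⟨hb, hss⟩]
    rcases List.eq_nil_or_concat bs with rfl | ⟨init, last, rfl⟩
    · exact absurd rfl hb
    simp only [List.concat_eq_append]
    split
    · rename_i r hp
      rw [List.concat_eq_append, PySem.List.pop?_last] at hp
      obtain rfl : r = (last, init) := by injection hp with h; exact h.symm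
      have hmem : get_closest ss last ∈ ss := get_closest_mem ss last hss hs
      rw [PySem.List.remove?_eq_some_erase ss _ hmem]
      simp only [Option.getD_some]
      have hs' : (ss.erase (get_closest ss last)).Pairwise (· ≤ ·) :=
        hs.sublist (List.erase_sublist)
      have hlen' : (ss.erase (get_closest ss last)).length = ss.length - 1 :=
        List.length_erase_of_mem hmem
      have hi : init.length ≤ k := by
        have := hn; simp [List.length_append] at this; omega
      rw [ih init _ hi hs']
      have hsl : 0 < ss.length := List.length_pos_iff.mpr hss
      rw [hlen']
      have heq : init.length - (ss.length - 1)
          = (init ++ [last]).length - ss.length := by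
        simp [List.length_append]; omega
      rw [heq]
      rw [List.take_append_of_le_length (by simp [List.length_append]; omega)]
    · rename_i hp
      rw [List.concat_eq_append, PySem.List.pop?_last] at hp
      exact absurd hp (by simp)

-- head of the sorted list is Python's min
theorem head_sorted_eq_min (xs : List Int) (hd : Int) (t : List Int)
    (h : PySem.List.sorted xs (fun x => x) false = hd :: t) :
    PySem.List.min? xs (fun x => x) = some hd := by
  have hmem : hd ∈ xs := by
    rw [← PySem.List.mem_sorted xs (fun x => x) false, h]; simp
  obtain ⟨m, hm⟩ : ∃ m, PySem.List.min? xs (fun x => x) = some m := by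
    cases hmin : PySem.List.min? xs (fun x => x) with
    | none =>
      rw [PySem.List.min?_eq_none_iff] at hmin
      subst hmin; simp at hmem
    | some m => exact ⟨m, rfl⟩
  have h1 : hd ≤ m := PySem.List.key_head_sorted_le xs (fun x => x) h m
    (PySem.List.min?_mem hm)
  have h2 : m ≤ hd := PySem.List.min?_id_le hm hd hmem
  rw [hm, le_antisymm h1 h2]

-- ===== VERDICT (by name: the statement is the Claim_ definition above) =====
theorem match_making_spec : Claim_equal_match_making := by
  intro nb ns bages sages _
  unfold Spec_match_making match_making match_making_alt
  simp only []
  set b := PySem.List.sorted bages (fun x => x) false with hb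
  set s := PySem.List.sorted sages (fun x => x) false with hsdef
  have hsp : s.Pairwise (· ≤ ·) := PySem.List.sorted_pairwise sages (fun x => x)
  have hr : (mmLoop b s).1 = b.take (b.length - s.length) :=
    mmLoop_fst b.length b s le_rfl hsp
  have hbl : b.length = bages.length := PySem.List.length_sorted bages _ _
  have hsl : s.length = sages.length := PySem.List.length_sorted sages _ _
  by_cases hle : (bages.length : Int) - (sages.length : Int) ≤ 0
  · -- no surplus: loop empties the bachelors
    have : b.length - s.length = 0 := by omega
    rw [hr, this, List.take_zero]
    simp [hle]
  · -- surplus: remaining = first (B - S) sorted bachelors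
    have hpos : 0 < b.length - s.length := by omega
    have htne : b.take (b.length - s.length) ≠ [] := by
      simp [List.length_pos_iff.symm]; omega
    rw [hr, if_neg htne, if_neg hle]
    obtain ⟨hd, t, hbt⟩ := List.exists_cons_of_ne_nil
      (List.length_pos_iff.mp (show 0 < b.length by omega))
    have hbt' : b.length = t.length + 1 := by rw [hbt]; simp
    have htake : b.take (b.length - s.length)
        = hd :: t.take (b.length - s.length - 1) := by
      have h1 : b.length - s.length = (b.length - s.length - 1) + 1 := by omega
      rw [h1, hbt, List.take_succ_cons]
      simp
    rw [htake, PySem.List.pop?_zero_cons]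
    have hmin : PySem.List.min? bages (fun x => x) = some hd :=
      head_sorted_eq_min bages hd t (hb ▸ hbt)
    rw [hmin]
    simp only [Option.getD_some, List.length_cons, List.length_take]
    have : min (b.length - s.length - 1) t.length = b.length - s.length - 1 := by omega
    rw [this]
    congr 1
    push_cast
    omega
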